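-- pv_equiv track=rewrite | github.com/VitalyRomanov/python-type-prediction | src/type-prediction.py | parse_biluo
-- ===== SOURCE A (Python) =====
-- def parse_biluo(biluo):
--     spans = []
--
--     expected = {"B", "U", "0"}
--     expected_tag = None
--
--     c_start = 0
--
--     for ind, t in enumerate(biluo):
--         if t[0] not in expected:
--             expected = {"B", "U", "0"}
--             continue
--
--         if t[0] == "U":
--             c_start = ind
--             c_end = ind + 1
--             c_type = t.split("-")[1]
--             spans.append((c_start, c_end, c_type))
--             expected = {"B", "U", "0"}
--             expected_tag = None
--         elif t[0] == "B":
--             c_start = ind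
--             expected = {"I", "L"}
--             expected_tag = t.split("-")[1]
--         elif t[0] == "I":
--             if t.split("-")[1] != expected_tag:
--                 expected = {"B", "U", "0"}
--                 expected_tag = None
--                 continue
--         elif t[0] == "L":
--             if t.split("-")[1] != expected_tag:
--                 expected = {"B", "U", "0"}
--                 expected_tag = None
--                 continue
--             c_end = ind + 1
--             c_type = expected_tag
--             spans.append((c_start, c_end, c_type))
--             expected = {"B", "U", "0"}
--             expected_tag = None
--         elif t[0] == "0":
--             expected = {"B", "U", "0"}
--             expected_tag = None
--
--     return spans
-- ===== SOURCE B (Python) =====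
-- def parse_biluo(biluo):
--     # Greedy pattern matcher: scan for "U-X" or "B-X (I-X)* L-X" with an inner
--     # run-consuming loop and variable index jumps, instead of a per-token state machine.
--     spans = []
--     n = len(biluo)
--     i = 0
--     while i < n:
--         t = biluo[i]
--         h = t[0]
--         if h == "U":
--             spans.append((i, i + 1, t.split("-")[1]))
--             i += 1
--         elif h == "B":
--             typ = t.split("-")[1]
--             j = i + 1
--             while j < n and biluo[j][0] == "I" and biluo[j].split("-")[1] == typ:
--                 j += 1
--             if j < n and biluo[j][0] == "L" and biluo[j].split("-")[1] == typ:
--                 spans.append((i, j + 1, typ))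
--             i = j + 1  # the closing L, or the span-breaking token, is consumed
--         else:
--             i += 1
--     return spans
-- ===== Notes on version B (the rewrite author's own statement) =====
-- stated objective: alternative
-- what changed: Replaces A's token-by-token state machine (expected-tag set, expected_tag, leftover c_start carried through one uniform loop) by a greedy pattern matcher: an outer loop over span starts that, on 'B-X', runs an inner lookahead loop consuming the whole 'I-X' run and the closing token at once and jumps the index past the matched (or broken) span.
-- outside the precondition, e.g. on parse_biluo(['U']): A raises IndexError, B raises IndexError; on parse_biluo(['B-a', 'I']): A raises IndexError, B raises IndexError
import Mathlib
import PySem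

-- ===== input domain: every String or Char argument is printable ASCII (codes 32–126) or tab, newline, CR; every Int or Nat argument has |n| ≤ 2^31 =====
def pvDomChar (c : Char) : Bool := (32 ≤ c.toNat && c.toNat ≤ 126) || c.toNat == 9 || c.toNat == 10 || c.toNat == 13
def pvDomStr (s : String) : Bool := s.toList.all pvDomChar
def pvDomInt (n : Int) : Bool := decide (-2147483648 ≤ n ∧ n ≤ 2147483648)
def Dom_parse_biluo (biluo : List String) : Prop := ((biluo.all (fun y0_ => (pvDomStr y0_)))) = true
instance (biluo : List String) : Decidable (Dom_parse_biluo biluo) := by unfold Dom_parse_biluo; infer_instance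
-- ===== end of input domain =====

-- B replaces A's per-token state machine by a greedy pattern matcher (outer scan + inner run-consuming lookahead with index jumps); alternative decomposition, same one-pass cost.


-- ===== PORT A =====
-- t.split("-")[1]; total form (getD) — Pre_ guarantees the '-' is present wherever either Python reaches this split
def splitDash1 (t : String) : String := (((PySem.Str.split? t "-").getD []).getD 1 "")

-- t[0]; total form (getD) — Pre_ guarantees tokens are nonempty wherever either Python indexes them
def headChar (t : String) : Char := ((PySem.Str.pyGet? t 0).getD '?')

-- one iteration of A's for-loop; state = (spans, expected, expected_tag, c_start)
def biluoStepA (st : List (Int × Int × String) × List Char × Option String × Int)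
    (p : Int × String) : List (Int × Int × String) × List Char × Option String × Int :=
  let spans := st.1; let expected := st.2.1; let expected_tag := st.2.2.1; let c_start := st.2.2.2
  let ind := p.1; let t := p.2
  let t0 := headChar t
  if ¬ expected.contains t0 then (spans, ['B', 'U', '0'], expected_tag, c_start)
  else if t0 == 'U' then (spans ++ [(ind, ind + 1, splitDash1 t)], ['B', 'U', '0'], none, ind)
  else if t0 == 'B' then (spans, ['I', 'L'], some (splitDash1 t), ind)
  else if t0 == 'I' then
    (if some (splitDash1 t) ≠ expected_tag then (spans, ['B', 'U', '0'], none, c_start) else st)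
  else if t0 == 'L' then
    (if some (splitDash1 t) ≠ expected_tag then (spans, ['B', 'U', '0'], none, c_start)
     else (spans ++ [(c_start, ind + 1, expected_tag.getD "")], ['B', 'U', '0'], none, c_start))
  else if t0 == '0' then (spans, ['B', 'U', '0'], none, c_start)
  else st

def parse_biluo (biluo : List String) : List (Int × Int × String) :=
  ((PySem.List.enumerate biluo 0).foldl biluoStepA ([], ['B', 'U', '0'], none, 0)).1

-- ===== PORT B =====
-- goB = B's outer while-loop over the tokens from index i; goIn = the 'B-typ' arm:
-- runLen is the inner while-loop consuming the 'I-typ' run, then the token after the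
-- run (the closing 'L-typ', or the span-breaking token) is inspected and consumed,
-- and the outer loop resumes past it (i = j + 1 in Source B).
def runLen (typ : String) (xs : List String) : Nat :=
  match xs with
  | [] => 0
  | t :: rest => if headChar t == 'I' && splitDash1 t == typ then runLen typ rest + 1 else 0

mutual
def goB (xs : List String) (i : Int) : List (Int × Int × String) :=
  match xs with
  | [] => []
  | t :: rest =>
    if headChar t == 'U' then (i, i + 1, splitDash1 t) :: goB rest (i + 1)
    else if headChar t == 'B' then goIn i (splitDash1 t) rest (i + 1)
    else goB rest (i + 1)
termination_by 2 * xs.length + 1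
decreasing_by all_goals (simp only [List.length_cons]; omega)

def goIn (start : Int) (typ : String) (xs : List String) (i : Int) : List (Int × Int × String) :=
  let k := runLen typ xs
  if hk : k < xs.length then
    let u := xs[k]
    if headChar u == 'L' && splitDash1 u == typ then
      (start, i + (k : Int) + 1, typ) :: goB (xs.drop (k + 1)) (i + (k : Int) + 1)
    else goB (xs.drop (k + 1)) (i + (k : Int) + 1)
  else []
termination_by 2 * xs.length
decreasing_by all_goals (simp only [List.length_drop]; omega)
end

def parse_biluo_alt (biluo : List String) : List (Int × Int × String) := goB biluo 0

-- ===== PRECONDITION & SPEC =====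
-- Pre_ excludes inputs with an empty token (t[0] raises IndexError), a dash-less token starting with
-- U or B (t.split("-")[1] raises IndexError when it is met outside a span), or a dash-less token
-- starting with I or L whose predecessor starts with B or I and contains '-' (the only way a span can
-- be open there, where the split raises); this closed form over-excludes a dash-less U/B token met
-- inside a span and a dash-less I/L token whose B/I-dash predecessor did not in fact leave a span
-- open, where both programs raise nowhere and return the same value.
def Pre_parse_biluo (biluo : List String) : Prop :=
  ∀ i < biluo.length,
    (biluo.getD i "").toList ≠ [] ∧
    ((biluo.getD i "").toList.headD ' ' ∈ (['U', 'B'] : List Char) → '-' ∈ (biluo.getD i "").toList) ∧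
    ((biluo.getD i "").toList.headD ' ' ∈ (['I', 'L'] : List Char) →
      ('-' ∈ (biluo.getD i "").toList ∨ i = 0 ∨
       ¬ ((biluo.getD (i - 1) "").toList.headD ' ' ∈ (['B', 'I'] : List Char) ∧
          '-' ∈ (biluo.getD (i - 1) "").toList)))
instance (biluo : List String) : Decidable (Pre_parse_biluo biluo) := by
  unfold Pre_parse_biluo; infer_instance

def pvWitness_parse_biluo : List String := ["B-x", "I-x", "L-x", "0", "U-y", "Other"]

def Spec_parse_biluo (biluo : List String) (out : List (Int × Int × String)) : Prop := out = parse_biluo_alt biluo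
instance (biluo : List String) (out : List (Int × Int × String)) : Decidable (Spec_parse_biluo biluo out) := by unfold Spec_parse_biluo; infer_instance

-- ===== CLAIM (what is proved, stated in full; the proofs are below) =====
def Claim_equal_parse_biluo : Prop := ∀ (biluo : List String), Dom_parse_biluo biluo → Pre_parse_biluo biluo → Spec_parse_biluo biluo (parse_biluo biluo)

-- ===== LEMMAS AND PROOFS =====

-- Simultaneous induction on the token list: A's fold from the outside state computes goB, and
-- A's fold from the inside state (expected = {I,L}, tag τ, start s) computes goIn.
theorem biluo_fold_eq (xs : List String) :
    (∀ (i : Int) (sp : List (Int × Int × String)) (tag : Option String) (cs : Int),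
      ((PySem.List.enumerate xs i).foldl biluoStepA (sp, ['B', 'U', '0'], tag, cs)).1
        = sp ++ goB xs i) ∧
    (∀ (i : Int) (sp : List (Int × Int × String)) (τ : String) (s : Int),
      ((PySem.List.enumerate xs i).foldl biluoStepA (sp, ['I', 'L'], some τ, s)).1
        = sp ++ goIn s τ xs i) := by
  induction xs with
  | nil => constructor <;> intros <;> simp [PySem.List.enumerate_nil, goB, goIn]
  | cons t rest ih =>
    obtain ⟨ihO, ihI⟩ := ih
    constructor
    · intro i sp tag cs
      rw [PySem.List.enumerate_cons, List.foldl_cons, goB]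
      rcases hU : (headChar t == 'U') with _ | _ <;>
        rcases hB : (headChar t == 'B') with _ | _ <;>
        rcases hZ : (headChar t == '0') with _ | _ <;>
        simp_all [biluoStepA]
    · intro i sp τ s
      rw [PySem.List.enumerate_cons, List.foldl_cons]
      rcases hI : (headChar t == 'I' && splitDash1 t == τ) with _ | _
      · -- not a continuing I-τ token: run length 0, t is inspected as the closer/breaker
        have hk0 : runLen τ (t :: rest) = 0 := by simp [runLen, hI]
        rcases hL : (headChar t == 'L' && splitDash1 t == τ) with _ | _
        · -- breaker: A resets and consumes t; B consumes t after the empty run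
          have hgo : goIn s τ (t :: rest) i = goB rest (i + 1) := by
            rw [goIn]
            simp [hk0, hL]
          have hstep : ∃ tg cs, biluoStepA (sp, ['I', 'L'], some τ, s) (i, t)
              = (sp, ['B', 'U', '0'], tg, cs) := by
            by_cases h1 : headChar t = 'I'
            · exact ⟨none, s, by simp_all [biluoStepA]⟩
            · by_cases h2 : headChar t = 'L'
              · exact ⟨none, s, by simp_all [biluoStepA]⟩
              · exact ⟨some τ, s, by simp [biluoStepA, h1, h2]⟩
          obtain ⟨tg, cs, hstep⟩ := hstep
          rw [hstep, hgo, ihO]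
        · -- closing L-τ: A emits (s, i+1, τ); B emits t after the empty run
          simp only [Bool.and_eq_true, beq_iff_eq] at hL
          have hgo : goIn s τ (t :: rest) i = (s, i + 1, τ) :: goB rest (i + 1) := by
            rw [goIn]
            simp [hk0, hL.1, hL.2]
          have hstep : biluoStepA (sp, ['I', 'L'], some τ, s) (i, t)
              = (sp ++ [(s, i + 1, τ)], ['B', 'U', '0'], none, s) := by
            simp [biluoStepA, hL.1, hL.2]
          rw [hstep, hgo, ihO]
          simp
      · -- continuing I-τ token: A keeps its state, B extends the run
        simp only [Bool.and_eq_true, beq_iff_eq] at hI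
        have hgo : goIn s τ (t :: rest) i = goIn s τ rest (i + 1) := by
          rw [goIn, goIn]
          have hk : runLen τ (t :: rest) = runLen τ rest + 1 := by
            simp [runLen, hI.1, hI.2]
          by_cases hlt : runLen τ rest < rest.length
          · simp only [hk]
            rw [dif_pos (by simpa using Nat.succ_lt_succ hlt), dif_pos hlt]
            simp only [List.getElem_cons_succ, List.drop_succ_cons, Nat.cast_add, Nat.cast_one]
            rw [show i + ((runLen τ rest : Int) + 1) + 1 = i + 1 + (runLen τ rest : Int) + 1 from by ring]
          · rw [dif_neg (by simp [hk]; omega), dif_neg hlt]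
        have hstep : biluoStepA (sp, ['I', 'L'], some τ, s) (i, t)
            = (sp, ['I', 'L'], some τ, s) := by
          simp [biluoStepA, hI.1, hI.2]
        rw [hstep, hgo, ihI]

-- ===== VERDICT (by name: the statement is the Claim_ definition above) =====
theorem parse_biluo_spec : Claim_equal_parse_biluo := by
  intro biluo _ _
  unfold Spec_parse_biluo parse_biluo parse_biluo_alt
  simpa using (biluo_fold_eq biluo).1 0 [] none 0
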